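-- pv_equiv track=rewrite | github.com/buv/messstation_zwo | files/dfld_box/dnmsiic2influx.py | remove_crc
-- ===== SOURCE A (Python) =====
-- def remove_crc(data):
--     result = []
--     i = 0
--     while i+3 <= len(data):
--         result.append(data[i])
--         result.append(data[i+1])
--         i += 3
--     return result
-- ===== SOURCE B (Python) =====
-- def remove_crc(data):
--     result = []
--     for a, b, _crc in zip(data[0::3], data[1::3], data[2::3]):
--         result.append(a)
--         result.append(b)
--     return result
-- ===== Notes on version B (the rewrite author's own statement) =====
-- stated objective: idiomatic
-- what changed: replaces the manual stride-3 index walk with a columnar traversal: zip over the three strided slices data[0::3], data[1::3], data[2::3], whose truncation to the shortest column encodes the 'complete triple' condition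
import Mathlib
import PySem

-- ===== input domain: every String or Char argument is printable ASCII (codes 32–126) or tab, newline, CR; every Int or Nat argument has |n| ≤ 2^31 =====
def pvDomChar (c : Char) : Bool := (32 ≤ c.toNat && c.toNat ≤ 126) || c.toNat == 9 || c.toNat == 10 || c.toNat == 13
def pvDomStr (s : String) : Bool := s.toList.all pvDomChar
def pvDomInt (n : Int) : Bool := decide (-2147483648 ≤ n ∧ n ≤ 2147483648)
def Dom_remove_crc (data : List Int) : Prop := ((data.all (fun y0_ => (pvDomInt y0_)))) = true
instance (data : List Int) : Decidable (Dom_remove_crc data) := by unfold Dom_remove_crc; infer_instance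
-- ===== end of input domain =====

-- B replaces A's manual stride-3 index walk with a zip over the three strided
-- slices data[0::3], data[1::3], data[2::3] (same cost; no speed claim).


-- ===== PORT A =====
-- while i+3 <= len(data): result += [data[i], data[i+1]]; i += 3
-- (the guard keeps both indices in range, so getD is exact there)
def removeCrcLoop (data : List Int) (i : Nat) (result : List Int) : List Int :=
  if i + 3 ≤ data.length then
    removeCrcLoop data (i + 3) (result ++ [data.getD i 0, data.getD (i + 1) 0])
  else result
termination_by data.length - i
decreasing_by omega

def remove_crc (data : List Int) : List Int :=
  removeCrcLoop data 0 []

-- ===== PORT B =====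
-- for a, b, _crc in zip(data[0::3], data[1::3], data[2::3]): result += [a, b]
def remove_crc_alt (data : List Int) : List Int :=
  let c0 := (PySem.List.slice? data (some 0) none 3).getD []
  let c1 := (PySem.List.slice? data (some 1) none 3).getD []
  let c2 := (PySem.List.slice? data (some 2) none 3).getD []
  ((c0.zip c1).zip c2).foldl (fun r p => r ++ [p.1.1, p.1.2]) []

-- ===== PRECONDITION & SPEC =====
def Spec_remove_crc (data : List Int) (out : List Int) : Prop := out = remove_crc_alt data
instance (data : List Int) (out : List Int) : Decidable (Spec_remove_crc data out) := by unfold Spec_remove_crc; infer_instance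

-- ===== CLAIM (what is proved, stated in full; the proofs are below) =====
def Claim_equal_remove_crc : Prop := ∀ (data : List Int), Dom_remove_crc data → Spec_remove_crc data (remove_crc data)

-- ===== LEMMAS AND PROOFS =====

-- canonical meaning: keep the first two of each complete triple
def chunkAB : List Int → List Int
  | a :: b :: _ :: rest => a :: b :: chunkAB rest
  | _ => []

theorem chunkAB_short (l : List Int) (h : l.length < 3) : chunkAB l = [] := by
  match l with
  | [] => rfl
  | [_] => rfl
  | [_, _] => rfl
  | _ :: _ :: _ :: _ => simp at h; omega

theorem removeCrcLoop_eq (data : List Int) (i : Nat) (res : List Int) :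
    removeCrcLoop data i res = res ++ chunkAB (data.drop i) := by
  rw [removeCrcLoop]
  by_cases h : i + 3 ≤ data.length
  · simp only [h, if_true]
    rw [removeCrcLoop_eq data (i + 3)]
    have h0 : i < data.length := by omega
    have h1 : i + 1 < data.length := by omega
    have h2 : i + 2 < data.length := by omega
    have hd : data.drop i = data[i] :: data[i+1] :: data[i+2] :: data.drop (i+3) := by
      rw [List.drop_eq_getElem_cons h0, List.drop_eq_getElem_cons h1,
          List.drop_eq_getElem_cons h2]
    rw [hd]
    simp [chunkAB, List.getD_eq_getElem?_getD, h0, h1]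
  · simp only [h, if_false]
    rw [chunkAB_short _ (by simp; omega)]
    simp
termination_by data.length - i
decreasing_by omega

def every3 : List Int → List Int
  | [] => []
  | y :: ys => y :: every3 (ys.drop 2)
termination_by l => l.length
decreasing_by simp

theorem every3_eq_filterMap (ys : List Int) :
    every3 ys = List.filterMap (fun j => ys[3 * j]?) (List.range (((ys.length : Int) + 2) / 3).toNat) := by
  match ys with
  | [] => rw [every3]; simp
  | y :: t =>
    rw [every3, every3_eq_filterMap (t.drop 2)]
    have hcnt : ((((y :: t).length : Int) + 2) / 3).toNat
        = ((((t.drop 2).length : Int) + 2) / 3).toNat + 1 := by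
      simp [List.length_drop]; omega
    rw [hcnt, List.range_succ_eq_map]
    simp only [List.filterMap_cons, Nat.mul_zero, List.getElem?_cons_zero]
    congr 1
    rw [List.filterMap_map]
    apply List.filterMap_congr
    intro j _
    have h3 : 3 * (j + 1) = (2 + 3 * j) + 1 := by ring
    simp only [Function.comp, h3, List.getElem?_cons_succ, List.getElem?_drop]
termination_by ys.length
decreasing_by simp

theorem slice3 (xs : List Int) (k : Nat) :
    PySem.List.slice? xs (some (k : Int)) none 3 = some (every3 (xs.drop k)) := by
  have hknn : ¬ ((k:Int) < 0) := by omega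
  simp only [PySem.List.slice?, PySem.List.sliceIndices]
  norm_num [hknn]
  by_cases hk : k < xs.length
  · rw [if_pos hk]
    have hmin : min (k:Int) (xs.length:Int) = (k:Int) := by omega
    rw [hmin, every3_eq_filterMap]
    have hc : (((xs.length:Int) - (k:Int) + 3 - 1) / 3).toNat
        = ((((xs.drop k).length : Int) + 2) / 3).toNat := by
      simp [List.length_drop]; omega
    rw [hc]
    congr 1
    apply funext
    intro j
    rw [List.getElem?_drop]
    congr 1
  · have hd : xs.drop k = [] := List.drop_eq_nil_of_le (by omega)
    simp only [if_neg hk, hd, List.range_zero, List.filterMap_nil, every3]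


theorem foldl_pairs (L : List ((Int × Int) × Int)) (acc : List Int) :
    L.foldl (fun r p => r ++ [p.1.1, p.1.2]) acc
      = acc ++ L.flatMap (fun p => [p.1.1, p.1.2]) := by
  induction L generalizing acc with
  | nil => simp
  | cons p t ih => simp [List.foldl_cons, ih]

theorem zipcols_eq (xs : List Int) :
    (((every3 xs).zip (every3 (xs.drop 1))).zip (every3 (xs.drop 2))).flatMap
        (fun p => [p.1.1, p.1.2]) = chunkAB xs := by
  match xs with
  | [] => simp [every3, chunkAB]
  | [a] => simp [every3, chunkAB]
  | [a, b] => simp [every3, chunkAB]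
  | a :: b :: c :: rest =>
    have e0 : every3 (a :: b :: c :: rest) = a :: every3 rest := by
      rw [every3]; rfl
    have e1 : every3 ((a :: b :: c :: rest).drop 1) = b :: every3 (rest.drop 1) := by
      rw [show (a :: b :: c :: rest).drop 1 = b :: c :: rest from rfl, every3]
      rfl
    have e2 : every3 ((a :: b :: c :: rest).drop 2) = c :: every3 (rest.drop 2) := by
      rw [show (a :: b :: c :: rest).drop 2 = c :: rest from rfl, every3]
    rw [e0, e1, e2]
    simp only [List.zip_cons_cons, List.flatMap_cons]
    rw [zipcols_eq rest]
    rfl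
termination_by xs.length
decreasing_by simp; omega

theorem alt_eq_chunkAB (data : List Int) : remove_crc_alt data = chunkAB data := by
  rw [remove_crc_alt]
  have h0 := slice3 data 0
  have h1 := slice3 data 1
  have h2 := slice3 data 2
  simp only [Nat.cast_zero, Nat.cast_one, Nat.cast_ofNat] at h0 h1 h2
  rw [h0, h1, h2]
  simp only [Option.getD_some, List.drop_zero]
  rw [foldl_pairs, List.nil_append, zipcols_eq]

-- ===== VERDICT (by name: the statement is the Claim_ definition above) =====
theorem remove_crc_spec : Claim_equal_remove_crc := by
  intro data _
  unfold Spec_remove_crc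
  rw [remove_crc, removeCrcLoop_eq, alt_eq_chunkAB]
  simp
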